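-- pv_equiv track=rewrite | github.com/Ridham69/Fintech--backend | backend/app/utils/referral.py | validate_referral_code
-- ===== SOURCE A (Python) =====
-- import string
--
-- def validate_referral_code(code: str) -> bool:
--     """
--     Validate referral code format.
--
--     Args:
--         code: Referral code to validate
--
--     Returns:
--         True if valid, False otherwise
--     """
--     if not code:
--         return False
--
--     # Check length
--     if not 6 <= len(code) <= 10:
--         return False
--
--     # Check characters
--     valid_chars = set(string.ascii_uppercase + string.digits)
--     if not all(c in valid_chars for c in code):
--         return False
--
--     return True
-- ===== SOURCE B (Python) =====
-- def validate_referral_code(code: str) -> bool: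
--     """Single-pass validator: count characters with a cap of 10, rejecting any
--     character outside A-Z/0-9 immediately; accept iff at least 6 were seen."""
--     n = 0
--     for c in (code or ""):
--         if n == 10 or not ('A' <= c <= 'Z' or '0' <= c <= '9'):
--             return False
--         n += 1
--     return n >= 6
-- ===== Notes on version B (the rewrite author's own statement) =====
-- stated objective: alternative
-- what changed: Replaces A's three separate passes (truthiness guard, len() bounds check, all() membership test against a precomputed 36-character set) with one early-exit scan that counts characters up to a cap of 10 and range-compares each character, accepting iff at least 6 were counted.
import Mathlib
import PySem

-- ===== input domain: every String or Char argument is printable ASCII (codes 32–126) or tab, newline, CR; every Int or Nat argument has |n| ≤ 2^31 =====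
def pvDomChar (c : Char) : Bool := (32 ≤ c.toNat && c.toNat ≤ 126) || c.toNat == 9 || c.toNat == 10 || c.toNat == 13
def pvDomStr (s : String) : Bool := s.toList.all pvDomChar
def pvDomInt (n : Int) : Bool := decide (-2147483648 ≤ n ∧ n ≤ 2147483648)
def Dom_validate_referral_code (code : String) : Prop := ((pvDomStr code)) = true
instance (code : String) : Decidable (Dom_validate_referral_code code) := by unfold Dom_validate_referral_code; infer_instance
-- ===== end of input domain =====

-- B replaces A's three separate checks (emptiness, length bounds, all-chars-in-set)
-- with one early-exit scan counting characters up to a cap of 10 (objective: alternative).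

-- ===== PORT A =====
-- string.ascii_uppercase + string.digits, written as the concatenated literal
def validate_referral_code (code : String) : Bool :=
  if code.toList = [] then false                                   -- if not code
  else if !(decide (6 ≤ PySem.Str.len code ∧ PySem.Str.len code ≤ 10)) then false
  else
    let valid_chars := PySem.Set.ofList ("ABCDEFGHIJKLMNOPQRSTUVWXYZ0123456789").toList
    if !(code.toList.all (fun c => PySem.Set.contains valid_chars c)) then false
    else true

-- ===== PORT B =====
def vrcOk (c : Char) : Bool := ('A' ≤ c && c ≤ 'Z') || ('0' ≤ c && c ≤ '9')

def vrcGo : List Char → Nat → Bool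
  | [], n => decide (6 ≤ n)
  | c :: cs, n => if n == 10 || !vrcOk c then false else vrcGo cs (n + 1)

def validate_referral_code_alt (code : String) : Bool :=
  vrcGo code.toList 0

-- ===== PRECONDITION & SPEC =====
def Spec_validate_referral_code (code : String) (out : Bool) : Prop := out = validate_referral_code_alt code
instance (code : String) (out : Bool) : Decidable (Spec_validate_referral_code code out) := by unfold Spec_validate_referral_code; infer_instance

-- ===== CLAIM (what is proved, stated in full; the proofs are below) =====
def Claim_equal_validate_referral_code : Prop := ∀ (code : String), Dom_validate_referral_code code → Spec_validate_referral_code code (validate_referral_code code)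

-- ===== LEMMAS AND PROOFS =====

-- the 36-element literal set tests exactly the two character ranges B compares against
set_option maxRecDepth 4096 in
theorem vrc_contains_eq_ok (c : Char) :
    PySem.Set.contains (PySem.Set.ofList ("ABCDEFGHIJKLMNOPQRSTUVWXYZ0123456789").toList) c = vrcOk c := by
  simp only [show (PySem.Set.ofList ("ABCDEFGHIJKLMNOPQRSTUVWXYZ0123456789").toList) =
      "ABCDEFGHIJKLMNOPQRSTUVWXYZ0123456789".toList from by decide]
  simp only [PySem.Set.contains, vrcOk]
  rw [Bool.eq_iff_iff]
  simp [List.contains_eq_mem, Char.le_def, Char.ext_iff, UInt32.le_iff_toNat_le, UInt32.ext_iff]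
  omega

-- B's loop invariant: with n characters already counted (n ≤ 10), vrcGo accepts iff
-- every remaining character is in class and the total count lands in [6,10]
theorem vrcGo_spec (cs : List Char) (n : Nat) (h : n ≤ 10) :
    vrcGo cs n = (decide (6 ≤ n + cs.length) && decide (n + cs.length ≤ 10) && cs.all vrcOk) := by
  induction cs generalizing n with
  | nil => simp [vrcGo]; omega
  | cons c cs ih =>
    by_cases h10 : n = 10
    · subst h10
      simp only [vrcGo, List.length_cons]
      have : ¬ (10 + (cs.length + 1) ≤ 10) := by omega
      simp [this]
    · by_cases hc : vrcOk c
      · simp only [vrcGo, hc, List.length_cons, List.all_cons]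
        have hne : (n == 10) = false := by simp [h10]
        simp only [hne, Bool.not_true, Bool.or_false]
        rw [ih (n + 1) (by omega)]
        have e1 : n + 1 + cs.length = n + (cs.length + 1) := by omega
        rw [e1]; simp; rfl
      · simp only [vrcGo, hc, List.all_cons]
        simp

-- A's early-return chain over two boolean tests, as one conjunction
theorem if_pred_false_chain (x y : Bool) :
    (if !x then false else if !y then false else true) = (x && y) := by
  cases x <;> cases y <;> rfl

-- ===== VERDICT (by name: the statement is the Claim_ definition above) =====
theorem validate_referral_code_spec : Claim_equal_validate_referral_code := by
  intro code _
  unfold Spec_validate_referral_code validate_referral_code validate_referral_code_alt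
  rw [vrcGo_spec code.toList 0 (by omega)]
  by_cases hnil : code.toList = []
  · simp [hnil]
  · have hf : (fun c => PySem.Set.contains
        (PySem.Set.ofList ("ABCDEFGHIJKLMNOPQRSTUVWXYZ0123456789").toList) c) = vrcOk :=
      funext vrc_contains_eq_ok
    rw [if_neg hnil]
    simp only [hf]
    rw [if_pred_false_chain]
    have hd : (decide (6 ≤ PySem.Str.len code ∧ PySem.Str.len code ≤ 10))
        = (decide (6 ≤ 0 + code.toList.length) && decide (0 + code.toList.length ≤ 10)) := by
      rw [Bool.eq_iff_iff]
      simp [PySem.Str.len_eq]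
    rw [hd, Bool.and_assoc]
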